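-- pv_equiv track=rewrite | github.com/humzam241241/automations | jobs/append_to_master.py | append_rows
-- ===== SOURCE A (Python) =====
-- from typing import List
--
-- def append_rows(
--     existing_headers: List[str],
--     existing_rows: List[List[str]],
--     new_headers: List[str],
--     new_rows: List[List[str]],
--     deduplicate_column: str = None
-- ) -> tuple[List[str], List[List[str]]]:
--     """
--     Append new rows to existing dataset.
--
--     Args:
--         existing_headers: Current headers
--         existing_rows: Current rows
--         new_headers: Headers of new data
--         new_rows: New data rows
--         deduplicate_column: Optional column name to check for duplicates
--
--     Returns:
--         (merged_headers, merged_rows)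
--     """
--     # Align headers
--     merged_headers = existing_headers.copy()
--     for header in new_headers:
--         if header not in merged_headers:
--             merged_headers.append(header)
--
--     # Convert existing rows to match merged headers
--     result_rows = []
--     for row in existing_rows:
--         aligned_row = _align_row(row, existing_headers, merged_headers)
--         result_rows.append(aligned_row)
--
--     # Deduplicate if requested
--     if deduplicate_column and deduplicate_column in merged_headers:
--         existing_values = set()
--         col_idx = merged_headers.index(deduplicate_column)
--         for row in result_rows:
--             if col_idx < len(row):
--                 existing_values.add(row[col_idx])
--
--         new_col_idx = new_headers.index(deduplicate_column) if deduplicate_column in new_headers else -1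
--         for row in new_rows:
--             aligned_row = _align_row(row, new_headers, merged_headers)
--             if new_col_idx >= 0 and new_col_idx < len(row):
--                 if row[new_col_idx] not in existing_values:
--                     result_rows.append(aligned_row)
--             else:
--                 result_rows.append(aligned_row)
--     else:
--         # Just append all
--         for row in new_rows:
--             aligned_row = _align_row(row, new_headers, merged_headers)
--             result_rows.append(aligned_row)
--
--     return merged_headers, result_rows
--
-- def _align_row(row: List[str], source_headers: List[str], target_headers: List[str]) -> List[str]:
--     """Align a row from source schema to target schema."""
--     result = [""] * len(target_headers)
--     for i, header in enumerate(source_headers):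
--         if header in target_headers and i < len(row):
--             target_idx = target_headers.index(header)
--             result[target_idx] = row[i]
--     return result
-- ===== SOURCE B (Python) =====
-- def append_rows(existing_headers, existing_rows, new_headers, new_rows, deduplicate_column=None):
--     # Union schema: existing headers, then new headers not already present.
--     merged_headers = list(existing_headers)
--     present = set(merged_headers)
--     for h in new_headers:
--         if h not in present:
--             merged_headers.append(h)
--             present.add(h)
--
--     # First occurrence position of each merged header (only these slots get values).
--     first_pos = {}
--     for j, h in enumerate(merged_headers):
--         first_pos.setdefault(h, j)
--
--     def project(source_headers, row):
--         # header -> value map; zip stops at the shorter, dict gives last-wins.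
--         d = dict(zip(source_headers, row))
--         return [d.get(h, "") if first_pos[h] == j else ""
--                 for j, h in enumerate(merged_headers)]
--
--     result_rows = [project(existing_headers, row) for row in existing_rows]
--
--     if deduplicate_column and deduplicate_column in first_pos:
--         seen_vals = {dict(zip(existing_headers, row)).get(deduplicate_column, "")
--                      for row in existing_rows}
--         idx = new_headers.index(deduplicate_column) if deduplicate_column in new_headers else None
--         for row in new_rows:
--             if idx is not None and idx < len(row) and row[idx] in seen_vals:
--                 continue
--             result_rows.append(project(new_headers, row))
--     else:
--         result_rows.extend(project(new_headers, row) for row in new_rows)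
--
--     return merged_headers, result_rows
-- ===== Notes on version B (the rewrite author's own statement) =====
-- stated objective: faster
-- what changed: Replaces A's positional _align_row (a preallocated slot list filled via repeated target.index scans per source header) with a per-row header->value dict (zip, last-wins) projected through a precomputed first-occurrence-position map, and computes the dedup value set from the row dicts instead of the aligned rows.
import Mathlib
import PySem

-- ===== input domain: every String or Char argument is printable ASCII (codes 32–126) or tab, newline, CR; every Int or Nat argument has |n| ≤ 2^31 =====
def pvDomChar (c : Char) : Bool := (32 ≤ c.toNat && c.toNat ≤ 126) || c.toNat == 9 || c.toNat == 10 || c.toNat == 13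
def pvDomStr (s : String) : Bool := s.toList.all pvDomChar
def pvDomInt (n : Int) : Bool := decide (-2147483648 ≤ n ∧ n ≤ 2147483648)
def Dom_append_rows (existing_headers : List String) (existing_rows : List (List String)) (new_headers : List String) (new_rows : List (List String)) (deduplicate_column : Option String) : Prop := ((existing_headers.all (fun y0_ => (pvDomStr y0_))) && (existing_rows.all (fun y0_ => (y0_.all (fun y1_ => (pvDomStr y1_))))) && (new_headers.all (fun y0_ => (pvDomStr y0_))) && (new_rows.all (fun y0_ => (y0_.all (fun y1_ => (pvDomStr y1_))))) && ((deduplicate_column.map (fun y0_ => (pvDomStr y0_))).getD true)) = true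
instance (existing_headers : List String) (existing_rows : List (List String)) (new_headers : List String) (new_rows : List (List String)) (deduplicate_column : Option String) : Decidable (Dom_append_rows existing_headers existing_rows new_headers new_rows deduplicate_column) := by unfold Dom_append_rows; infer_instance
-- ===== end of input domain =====

-- B replaces A's positional _align_row (repeated target.index scans writing into a preallocated
-- slot list) by a header->value dict per row projected through a precomputed first-occurrence-
-- position map, removing the inner index scans (measured faster in a timing run); same results.

-- ===== PORT A =====
-- _align_row: result = [""]*len(target); for i,header in enumerate(source): if header in target and i < len(row): result[target.index(header)] = row[i]
def alignGo (row tgt : List String) : List String → Nat → List String → List String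
  | [], _, res => res
  | h :: rest, i, res =>
    alignGo row tgt rest (i + 1)
      (if tgt.contains h && decide (i < row.length)
       then res.set (List.idxOf h tgt) (row.getD i "") else res)

def pyAlignRow (row source target : List String) : List String :=
  alignGo row target source 0 (List.replicate target.length "")

def append_rows (existing_headers : List String) (existing_rows : List (List String)) (new_headers : List String) (new_rows : List (List String)) (deduplicate_column : Option String) : List String × List (List String) :=
  -- merged_headers = copy of existing, then each new header not already present
  let merged := new_headers.foldl (fun m h => if m.contains h then m else m ++ [h]) existing_headers
  -- result_rows: aligned existing rows
  let result0 := existing_rows.foldl (fun acc row => acc ++ [pyAlignRow row existing_headers merged]) []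
  match deduplicate_column with
  | some s =>
    if s ≠ "" ∧ merged.contains s then
      let colIdx := List.idxOf s merged
      let existingVals : PySem.Set String :=
        result0.foldl (fun st row => if colIdx < row.length then st.add (row.getD colIdx "") else st) PySem.Set.empty
      let newColIdx : Int := if new_headers.contains s then (List.idxOf s new_headers : Int) else -1
      let rows := new_rows.foldl (fun acc row =>
        let aligned := pyAlignRow row new_headers merged
        if 0 ≤ newColIdx ∧ newColIdx < (row.length : Int) then
          if existingVals.contains (PySem.List.pyGetD row newColIdx "") then acc else acc ++ [aligned]
        else acc ++ [aligned]) result0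
      (merged, rows)
    else (merged, new_rows.foldl (fun acc row => acc ++ [pyAlignRow row new_headers merged]) result0)
  | none => (merged, new_rows.foldl (fun acc row => acc ++ [pyAlignRow row new_headers merged]) result0)

-- ===== PORT B =====
-- d = dict(zip(source_headers, row)): zip stops at the shorter list, insert is last-wins
def bRowDict (src row : List String) : PySem.Dict String String :=
  (src.zip row).foldl (fun d p => d.insert p.1 p.2) PySem.Dict.empty

-- first_pos: header -> first position in merged (setdefault keeps the first)
def firstPosGo (d : PySem.Dict String Nat) (j : Nat) : List String → PySem.Dict String Nat
  | [] => d
  | h :: rest => firstPosGo (d.setdefault h j) (j + 1) rest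

-- project: [d.get(h, "") if first_pos[h] == j else "" for j, h in enumerate(merged_headers)]
def projectGo (fp : PySem.Dict String Nat) (d : PySem.Dict String String) : Nat → List String → List String
  | _, [] => []
  | j, h :: rest => (if fp.getD h 0 = j then d.getD h "" else "") :: projectGo fp d (j + 1) rest

def append_rows_alt (existing_headers : List String) (existing_rows : List (List String)) (new_headers : List String) (new_rows : List (List String)) (deduplicate_column : Option String) : List String × List (List String) :=
  let mp := new_headers.foldl
    (fun (mp : List String × PySem.Set String) h =>
      if mp.2.contains h then mp else (mp.1 ++ [h], mp.2.add h))
    (existing_headers, PySem.Set.ofList existing_headers)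
  let merged := mp.1
  let fp := firstPosGo PySem.Dict.empty 0 merged
  let resultRows := existing_rows.map (fun row => projectGo fp (bRowDict existing_headers row) 0 merged)
  match deduplicate_column with
  | some s =>
    if s ≠ "" ∧ fp.contains s then
      let seenVals : PySem.Set String :=
        PySem.Set.ofList (existing_rows.map (fun row => (bRowDict existing_headers row).getD s ""))
      let idx : Option Nat := if new_headers.contains s then some (List.idxOf s new_headers) else none
      let rows := new_rows.foldl (fun acc row =>
        match idx with
        | some i =>
          if i < row.length ∧ seenVals.contains (row.getD i "") then acc
          else acc ++ [projectGo fp (bRowDict new_headers row) 0 merged]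
        | none => acc ++ [projectGo fp (bRowDict new_headers row) 0 merged]) resultRows
      (merged, rows)
    else (merged, resultRows ++ new_rows.map (fun row => projectGo fp (bRowDict new_headers row) 0 merged))
  | none => (merged, resultRows ++ new_rows.map (fun row => projectGo fp (bRowDict new_headers row) 0 merged))

-- ===== PRECONDITION & SPEC =====
def Spec_append_rows (existing_headers : List String) (existing_rows : List (List String)) (new_headers : List String) (new_rows : List (List String)) (deduplicate_column : Option String) (out : List String × List (List String)) : Prop := out = append_rows_alt existing_headers existing_rows new_headers new_rows deduplicate_column
instance (existing_headers : List String) (existing_rows : List (List String)) (new_headers : List String) (new_rows : List (List String)) (deduplicate_column : Option String) (out : List String × List (List String)) : Decidable (Spec_append_rows existing_headers existing_rows new_headers new_rows deduplicate_column out) := by unfold Spec_append_rows; infer_instance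

-- ===== CLAIM (what is proved, stated in full; the proofs are below) =====
def Claim_equal_append_rows : Prop := ∀ (existing_headers : List String) (existing_rows : List (List String)) (new_headers : List String) (new_rows : List (List String)) (deduplicate_column : Option String), Dom_append_rows existing_headers existing_rows new_headers new_rows deduplicate_column → Spec_append_rows existing_headers existing_rows new_headers new_rows deduplicate_column (append_rows existing_headers existing_rows new_headers new_rows deduplicate_column)

-- ===== LEMMAS AND PROOFS =====

-- last-wins association-list lookup: the value dict(zip(...)) stores
def lookupLast : List (String × String) → String → Option String
  | [], _ => none
  | p :: rest, k =>
    match lookupLast rest k with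
    | some v => some v
    | none => if p.1 = k then some p.2 else none

theorem getD_foldl_insert (ps : List (String × String)) (d : PySem.Dict String String) (k : String) (dflt : String) :
    (ps.foldl (fun d p => d.insert p.1 p.2) d).getD k dflt =
      match lookupLast ps k with
      | some v => v
      | none => d.getD k dflt := by
  induction ps generalizing d with
  | nil => rfl
  | cons p rest ih =>
    simp only [List.foldl_cons, ih, lookupLast]
    cases lookupLast rest k with
    | some v => rfl
    | none =>
      simp only [PySem.Dict.getD_insert]
      by_cases h : p.1 = k
      · simp [h]
      · simp [h, Ne.symm h]

theorem bRowDict_getD (src row : List String) (k : String) :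
    (bRowDict src row).getD k "" =
      match lookupLast (src.zip row) k with
      | some v => v
      | none => "" := by
  simp [bRowDict, getD_foldl_insert]

theorem idxOf?_of_mem {l : List String} {k : String} (h : k ∈ l) :
    List.idxOf? k l = some (List.idxOf k l) := by
  rw [List.idxOf_eq_getD_idxOf?]
  cases hx : List.idxOf? k l
  · exact absurd (List.idxOf?_eq_none_iff.mp hx) (by simpa using h)
  · simp

theorem firstPosGo_get? (l : List String) (d : PySem.Dict String Nat) (j : Nat) (k : String) :
    (firstPosGo d j l).get? k =
      match d.get? k with
      | some v => some v
      | none => (List.idxOf? k l).map (· + j) := by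
  induction l generalizing d j with
  | nil => cases hd : d.get? k <;> simp [firstPosGo, hd]
  | cons h rest ih =>
    simp only [firstPosGo, ih]
    by_cases hc : d.contains h
    · rw [PySem.Dict.setdefault_of_contains d j hc]
      cases hd : d.get? k with
      | some v => rfl
      | none =>
        simp only [List.idxOf?_cons]
        by_cases hk : h = k
        · subst hk
          rw [PySem.Dict.contains_eq_isSome_get?, hd] at hc
          simp at hc
        · simp only [beq_iff_eq, hk, if_false]
          cases hx : List.idxOf? k rest
          · simp [hx]
          · simp [hx]; omega
    · rw [PySem.Dict.setdefault_of_not_contains d j (by simpa using hc)]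
      rw [PySem.Dict.get?_insert]
      by_cases hk : k = h
      · subst hk
        have hd : d.get? k = none := by
          rw [PySem.Dict.contains_eq_isSome_get?] at hc
          cases hdd : d.get? k <;> simp [hdd] at hc ⊢
        simp [hd, List.idxOf?_cons]
      · simp only [hk, if_false]
        cases hd : d.get? k with
        | some v => rfl
        | none =>
          simp only [List.idxOf?_cons, beq_iff_eq]
          have hne : ¬ (h = k) := fun e => hk e.symm
          simp only [hne, if_false]
          cases hx : List.idxOf? k rest
          · simp [hx]
          · simp [hx]; omega

theorem firstPos_getD (merged : List String) (h : String) (hm : h ∈ merged) :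
    (firstPosGo PySem.Dict.empty 0 merged).getD h 0 = List.idxOf h merged := by
  rw [PySem.Dict.getD_eq_get?_getD, firstPosGo_get?]
  simp [PySem.Dict.get?_empty, idxOf?_of_mem hm]

theorem firstPos_contains (merged : List String) (k : String) :
    (firstPosGo PySem.Dict.empty 0 merged).contains k = merged.contains k := by
  rw [PySem.Dict.contains_eq_isSome_get?, firstPosGo_get?]
  simp only [PySem.Dict.get?_empty]
  by_cases hm : k ∈ merged
  · simp [idxOf?_of_mem hm, hm]
  · simp [List.idxOf?_eq_none_iff.mpr hm, hm]

theorem alignGo_length (row tgt : List String) (src : List String) (i : Nat) (res : List String) :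
    (alignGo row tgt src i res).length = res.length := by
  induction src generalizing i res with
  | nil => rfl
  | cons h rest ih =>
    simp only [alignGo, ih]
    split <;> simp

theorem alignGo_getD (row tgt : List String) (j : Nat) (hj : j < tgt.length)
    (src : List String) (i : Nat) (res : List String)
    (hsub : ∀ h ∈ src, h ∈ tgt) (hlen : res.length = tgt.length) :
    (alignGo row tgt src i res).getD j "" =
      if List.idxOf (tgt.getD j "") tgt = j then
        match lookupLast (src.zip (row.drop i)) (tgt.getD j "") with
        | some v => v
        | none => res.getD j ""
      else res.getD j "" := by
  induction src generalizing i res with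
  | nil =>
    simp only [alignGo, List.zip_nil_left, lookupLast]
    split <;> rfl
  | cons h rest ih =>
    have hmem : h ∈ tgt := hsub h (by simp)
    have hsub' : ∀ x ∈ rest, x ∈ tgt := fun x hx => hsub x (by simp [hx])
    have hkey : tgt.getD j "" = tgt[j] := by
      simp [List.getD_eq_getElem?_getD, List.getElem?_eq_getElem hj]
    have ha : List.idxOf h tgt < tgt.length := List.idxOf_lt_length_of_mem hmem
    have hth : tgt[List.idxOf h tgt] = h := List.getElem_idxOf ha
    simp only [alignGo]
    by_cases hi : i < row.length
    · rw [if_pos (by simp [hi, hmem])]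
      have hdrop : row.drop i = row[i] :: row.drop (i + 1) :=
        List.drop_eq_getElem_cons hi
      have hlen' : (res.set (List.idxOf h tgt) (row.getD i "")).length = tgt.length := by
        simp [hlen]
      rw [ih (i + 1) _ hsub' hlen', hdrop]
      simp only [List.zip_cons_cons, lookupLast]
      have hset : ∀ (b : String),
          (res.set (List.idxOf h tgt) (row.getD i "")).getD j b
            = if List.idxOf h tgt = j then row.getD i "" else res.getD j b := by
        intro b
        have hres : List.idxOf h tgt < res.length := by rw [hlen]; exact ha
        simp only [List.getD_eq_getElem?_getD, List.getElem?_set]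
        by_cases heq : List.idxOf h tgt = j
        · simp only [heq, if_pos rfl, if_pos (show j < res.length from heq ▸ hres)]
          simp
        · simp [heq]
      by_cases hfirst : List.idxOf (tgt.getD j "") tgt = j
      · rw [if_pos hfirst, if_pos hfirst]
        cases hlk : lookupLast (rest.zip (row.drop (i + 1))) (tgt.getD j "")
        · simp only []
          by_cases hhk : h = tgt.getD j ""
          · have haj : List.idxOf h tgt = j := by rw [hhk, hfirst]
            rw [hset, if_pos haj, if_pos hhk]
            simp [List.getD_eq_getElem?_getD, List.getElem?_eq_getElem hi]
          · have haj : List.idxOf h tgt ≠ j := by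
              intro e
              apply hhk
              subst e
              rw [hkey]
              exact hth.symm
            rw [hset, if_neg haj, if_neg hhk]
        · rfl
      · rw [if_neg hfirst, if_neg hfirst]
        have haj : List.idxOf h tgt ≠ j := by
          intro e
          apply hfirst
          subst e
          rw [hkey, hth]
        rw [hset, if_neg haj]
    · rw [if_neg (by simp [hi])]
      have hdrop : row.drop i = [] := List.drop_eq_nil_of_le (by omega)
      have hdrop' : row.drop (i + 1) = [] := List.drop_eq_nil_of_le (by omega)
      rw [ih (i + 1) res hsub' hlen, hdrop, hdrop']
      simp only [List.zip_nil_right, lookupLast]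

theorem projectGo_length (fp : PySem.Dict String Nat) (d : PySem.Dict String String)
    (l : List String) (j : Nat) : (projectGo fp d j l).length = l.length := by
  induction l generalizing j with
  | nil => rfl
  | cons h rest ih => simp [projectGo, ih]

theorem projectGo_getD (fp : PySem.Dict String Nat) (d : PySem.Dict String String)
    (l : List String) (j0 k : Nat) (hk : k < l.length) :
    (projectGo fp d j0 l).getD k "" =
      if fp.getD (l.getD k "") 0 = j0 + k then d.getD (l.getD k "") "" else "" := by
  induction l generalizing j0 k with
  | nil => simp at hk
  | cons h rest ih =>
    cases k with
    | zero => simp [projectGo]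
    | succ k' =>
      have hk' : k' < rest.length := by simpa using hk
      simp only [projectGo, List.getD_cons_succ]
      rw [ih (j0 + 1) k' hk']
      have : j0 + 1 + k' = j0 + (k' + 1) := by omega
      rw [this]

-- the central row-shape lemma: A's positional alignment = B's dict projection
theorem align_eq_project (merged src row : List String) (hsub : ∀ h ∈ src, h ∈ merged) :
    pyAlignRow row src merged =
      projectGo (firstPosGo PySem.Dict.empty 0 merged) (bRowDict src row) 0 merged := by
  apply List.ext_getElem
  · rw [projectGo_length, pyAlignRow, alignGo_length, List.length_replicate]
  · intro j hj hj2
    have hjm : j < merged.length := by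
      rw [pyAlignRow, alignGo_length, List.length_replicate] at hj; exact hj
    have hL : (pyAlignRow row src merged)[j] = (pyAlignRow row src merged).getD j "" := by
      simp [List.getD_eq_getElem?_getD, List.getElem?_eq_getElem hj]
    have hR : (projectGo (firstPosGo PySem.Dict.empty 0 merged) (bRowDict src row) 0 merged)[j]
        = (projectGo (firstPosGo PySem.Dict.empty 0 merged) (bRowDict src row) 0 merged).getD j "" := by
      simp [List.getD_eq_getElem?_getD, List.getElem?_eq_getElem hj2]
    rw [hL, hR, pyAlignRow,
      alignGo_getD row merged j hjm src 0 _ hsub (by simp),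
      projectGo_getD _ _ _ 0 j hjm]
    have hmem : merged.getD j "" ∈ merged := by
      have : merged.getD j "" = merged[j] := by
        simp [List.getD_eq_getElem?_getD, List.getElem?_eq_getElem hjm]
      rw [this]; exact List.getElem_mem hjm
    rw [firstPos_getD merged _ hmem, bRowDict_getD]
    simp only [List.drop_zero, Nat.zero_add]
    split
    · cases lookupLast (src.zip row) (merged.getD j "") <;> simp [List.getD_replicate]
    · simp [List.getD_replicate]

-- merged_headers: A's fold and B's fold (with the auxiliary 'present' set) agree
theorem mergedB_fst (nh : List String) (m : List String) (s : PySem.Set String)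
    (hinv : ∀ x, s.contains x = m.contains x) :
    (nh.foldl (fun (mp : List String × PySem.Set String) h =>
        if mp.2.contains h then mp else (mp.1 ++ [h], mp.2.add h)) (m, s)).1
      = nh.foldl (fun m h => if m.contains h then m else m ++ [h]) m := by
  induction nh generalizing m s with
  | nil => rfl
  | cons h rest ih =>
    simp only [List.foldl_cons, hinv h]
    by_cases hc : m.contains h = true
    · simp only [hc, if_pos rfl]
      exact ih m s hinv
    · rw [if_neg hc, if_neg hc]
      apply ih
      intro x
      have hsc : s.contains h = false := by rw [hinv h]; simpa using hc
      have hns : h ∉ s := by simpa [PySem.Set.contains] using hsc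
      have hx := hinv x
      simp only [PySem.Set.contains] at hx
      simp only [List.contains_eq_mem] at hx
      simp [PySem.Set.add, PySem.Set.contains, hns, List.mem_append, hx]

theorem ofList_contains (l : List String) (x : String) :
    (PySem.Set.ofList l).contains x = l.contains x := by
  by_cases hm : x ∈ l
  · simp [PySem.Set.contains, (PySem.Set.mem_ofList l x).mpr hm, hm]
  · simp [PySem.Set.contains, fun h => hm ((PySem.Set.mem_ofList l x).mp h), hm]

-- A's fold only grows merged, and every header lands in it
theorem mergedA_sub (nh : List String) (m : List String) :
    ∀ x ∈ m, x ∈ nh.foldl (fun m h => if m.contains h then m else m ++ [h]) m := by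
  induction nh generalizing m with
  | nil => intro x hx; exact hx
  | cons h rest ih =>
    intro x hx
    simp only [List.foldl_cons]
    split
    · exact ih m x hx
    · exact ih _ x (by simp [hx])

theorem mergedA_mem_new (nh : List String) (m : List String) :
    ∀ x ∈ nh, x ∈ nh.foldl (fun m h => if m.contains h then m else m ++ [h]) m := by
  induction nh generalizing m with
  | nil => intro x hx; simp at hx
  | cons h rest ih =>
    intro x hx
    simp only [List.foldl_cons]
    rcases List.mem_cons.mp hx with rfl | hx'
    · split
      · next hc => exact mergedA_sub rest m x (by simpa using hc)
      · exact mergedA_sub rest _ x (by simp)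
    · split <;> exact ih _ x hx'

theorem foldl_append_singleton {α β : Type} (l : List α) (f : α → β) (acc : List β) :
    l.foldl (fun a x => a ++ [f x]) acc = acc ++ l.map f := by
  induction l generalizing acc with
  | nil => simp
  | cons h rest ih => simp [ih]

theorem foldl_funext {α β : Type} {f g : β → α → β} (h : ∀ b a, f b a = g b a)
    (init : β) (l : List α) : l.foldl f init = l.foldl g init :=
  congrArg (fun f => l.foldl f init) (funext fun b => funext fun a => h b a)

theorem main_eq (eh : List String) (er : List (List String)) (nh : List String)
    (nr : List (List String)) (dc : Option String) :
    append_rows eh er nh nr dc = append_rows_alt eh er nh nr dc := by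
  simp only [append_rows, append_rows_alt]
  rw [mergedB_fst nh eh _ (fun x => ofList_contains eh x)]
  set M := nh.foldl (fun m h => if m.contains h then m else m ++ [h]) eh with hMdef
  have hsubE : ∀ h ∈ eh, h ∈ M := mergedA_sub nh eh
  have hsubN : ∀ h ∈ nh, h ∈ M := mergedA_mem_new nh eh
  set fp := firstPosGo PySem.Dict.empty 0 M with hfp
  have hAE : ∀ row, pyAlignRow row eh M = projectGo fp (bRowDict eh row) 0 M :=
    fun row => align_eq_project M eh row hsubE
  have hAN : ∀ row, pyAlignRow row nh M = projectGo fp (bRowDict nh row) 0 M :=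
    fun row => align_eq_project M nh row hsubN
  rw [foldl_append_singleton er (fun row => pyAlignRow row eh M) []]
  simp only [List.nil_append, hAE, hAN]
  cases dc with
  | none =>
    simp only []
    rw [foldl_append_singleton]
  | some s =>
    have hfpc : fp.contains s = M.contains s := by rw [hfp]; exact firstPos_contains M s
    simp only [hfpc]
    by_cases hcond : s ≠ "" ∧ M.contains s = true
    · rw [if_pos hcond, if_pos hcond]
      obtain ⟨hs0, hsm⟩ := hcond
      have hsmem : s ∈ M := by simpa using hsm
      have hci : List.idxOf s M < M.length := List.idxOf_lt_length_of_mem hsmem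
      have hkey : M.getD (List.idxOf s M) "" = s := by
        simp [List.getD_eq_getElem?_getD, List.getElem?_eq_getElem hci,
          List.getElem_idxOf hci]
      have hval : ∀ (d : PySem.Dict String String),
          (projectGo fp d 0 M).getD (List.idxOf s M) "" = d.getD s "" := by
        intro d
        rw [projectGo_getD fp d M 0 (List.idxOf s M) hci, hkey, hfp,
          firstPos_getD M s hsmem]
        simp
      -- the existing-values set
      have hset :
          (er.map (fun row => projectGo fp (bRowDict eh row) 0 M)).foldl
              (fun st row => if List.idxOf s M < row.length then st.add (row.getD (List.idxOf s M) "") else st)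
              PySem.Set.empty
            = PySem.Set.ofList (er.map (fun row => (bRowDict eh row).getD s "")) := by
        rw [List.foldl_map, PySem.Set.ofList_eq_foldl, List.foldl_map]
        have hfun : (fun (st : PySem.Set String) row =>
            if List.idxOf s M < (projectGo fp (bRowDict eh row) 0 M).length then
              st.add ((projectGo fp (bRowDict eh row) 0 M).getD (List.idxOf s M) "")
            else st)
            = fun (st : PySem.Set String) row => st.add ((bRowDict eh row).getD s "") := by
          funext st row
          rw [projectGo_length, if_pos hci, hval]
        rw [hfun]
        rfl
      rw [hset]
      -- the new-rows loop
      by_cases hsn : nh.contains s = true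
      · rw [if_pos hsn, if_pos hsn]
        apply congrArg
        apply foldl_funext
        intro acc row
        simp only []
        have hc0 : (0 : Int) ≤ (List.idxOf s nh : Int) := by positivity
        by_cases hlt : List.idxOf s nh < row.length
        · have hlt' : ((List.idxOf s nh : Int) < (row.length : Int)) := by exact_mod_cast hlt
          rw [if_pos ⟨hc0, hlt'⟩, PySem.List.pyGetD_natCast]
          by_cases hmem2 : (PySem.Set.ofList (er.map (fun row => (bRowDict eh row).getD s ""))).contains (row.getD (List.idxOf s nh) "") = true
          · rw [if_pos hmem2, if_pos ⟨hlt, hmem2⟩]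
          · rw [if_neg hmem2, if_neg (by intro h; exact hmem2 h.2)]
        · have hlt' : ¬ ((List.idxOf s nh : Int) < (row.length : Int)) := by exact_mod_cast hlt
          rw [if_neg (by intro h; exact hlt' h.2), if_neg (by intro h; exact hlt h.1)]
      · rw [if_neg hsn, if_neg hsn]
        apply congrArg
        apply foldl_funext
        intro acc row
        simp only []
        rw [if_neg (by intro h; exact absurd h.1 (by decide))]
    · rw [if_neg hcond, if_neg hcond]
      rw [foldl_append_singleton]

theorem append_rows_spec : Claim_equal_append_rows := by
  intro eh er nh nr dc _
  unfold Spec_append_rows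
  exact main_eq eh er nh nr dc
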